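-- pv_equiv track=rewrite | github.com/QuocTuanIT87/CuoiKy_NhapMonAI_Nhom_29 | hill-climbing algorithm.py | count_lessons
-- ===== SOURCE A (Python) =====
-- def count_lessons(mt):
--     schedule_le = []
--     count = 0
--     for j in range(len(mt[0])):
--         for i in range(len(mt)):
--             if (mt[i][j] == 1):
--                 count += 1
--         schedule_le.append(count)
--         count = 0
--     return schedule_le
-- ===== SOURCE B (Python) =====
-- def count_lessons(mt):
--     m = len(mt[0])
--
--     def col_counts(lo, hi):
--         if lo == hi:
--             return [0] * m
--         if hi - lo == 1:
--             row = mt[lo]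
--             return [1 if row[j] == 1 else 0 for j in range(m)]
--         mid = (lo + hi) // 2
--         left = col_counts(lo, mid)
--         right = col_counts(mid, hi)
--         return [left[j] + right[j] for j in range(m)]
--
--     return col_counts(0, len(mt))
-- ===== Notes on version B (the rewrite author's own statement) =====
-- stated objective: alternative
-- what changed: Replaces A's column-outer nested scan with a divide-and-conquer recursion over the row range: each row becomes a 0/1 indicator vector and the column counts of the two halves are summed elementwise.
import Mathlib
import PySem

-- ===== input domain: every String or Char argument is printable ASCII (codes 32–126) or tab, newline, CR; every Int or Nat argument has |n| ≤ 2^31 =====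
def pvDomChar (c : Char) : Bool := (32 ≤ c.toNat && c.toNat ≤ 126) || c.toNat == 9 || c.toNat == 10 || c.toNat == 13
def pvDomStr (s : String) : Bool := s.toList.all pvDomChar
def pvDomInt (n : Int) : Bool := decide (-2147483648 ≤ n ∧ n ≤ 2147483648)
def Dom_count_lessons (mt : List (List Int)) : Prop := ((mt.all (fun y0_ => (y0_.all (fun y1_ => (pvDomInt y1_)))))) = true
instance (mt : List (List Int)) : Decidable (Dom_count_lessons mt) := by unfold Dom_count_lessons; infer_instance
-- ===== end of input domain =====

-- B replaces A's column-outer nested scan by a divide-and-conquer recursion over the row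
-- range, summing the column-count vectors of the two halves elementwise: alternative algorithm, same cost.

-- ===== PORT A =====
def count_lessons (mt : List (List Int)) : List Int :=
  (PySem.List.pyRange 0 (PySem.List.len (PySem.List.pyGetD mt 0 []))).foldl
    (fun schedule_le j =>
      schedule_le ++
        [(PySem.List.pyRange 0 (PySem.List.len mt)).foldl
          (fun count i =>
            if PySem.List.pyGetD (PySem.List.pyGetD mt i []) j 0 = 1 then count + 1 else count)
          0])
    []

-- ===== PORT B =====
-- Python's 'lo == hi' guard is ported as 'hi - lo = 0' (equal on every reachable call,
-- which has lo ≤ hi) so the Nat recursion on hi - lo is visibly terminating.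
def pvColCountsB (mt : List (List Int)) (m : Nat) (lo hi : Nat) : List Int :=
  if hi - lo = 0 then List.replicate m 0
  else if hi - lo = 1 then
    (List.range m).map (fun (j : Nat) =>
      if PySem.List.pyGetD (PySem.List.pyGetD mt (lo : Int) []) (j : Int) 0 = 1 then (1 : Int) else 0)
  else
    (List.range m).map (fun (j : Nat) =>
      (pvColCountsB mt m lo ((lo + hi) / 2)).getD j 0 +
        (pvColCountsB mt m ((lo + hi) / 2) hi).getD j 0)
termination_by hi - lo
decreasing_by all_goals omega

def count_lessons_alt (mt : List (List Int)) : List Int :=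
  pvColCountsB mt (PySem.List.pyGetD mt 0 []).length 0 mt.length

-- ===== PRECONDITION & SPEC =====
-- Pre_ excludes exactly the inputs where the Python A raises IndexError: the empty matrix
-- (mt[0] fails) and ragged matrices with a row shorter than row 0 (mt[i][j] fails); B raises there too.
def Pre_count_lessons (mt : List (List Int)) : Prop :=
  mt ≠ [] ∧ ∀ row ∈ mt, (mt.headD []).length ≤ row.length
instance (mt : List (List Int)) : Decidable (Pre_count_lessons mt) := by
  unfold Pre_count_lessons; infer_instance
def pvWitness_count_lessons : List (List Int) := [[1, 0], [0, 1]]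
def Spec_count_lessons (mt : List (List Int)) (out : List Int) : Prop := out = count_lessons_alt mt
instance (mt : List (List Int)) (out : List Int) : Decidable (Spec_count_lessons mt out) := by unfold Spec_count_lessons; infer_instance

-- ===== CLAIM (what is proved, stated in full; the proofs are below) =====
def Claim_equal_count_lessons : Prop := ∀ (mt : List (List Int)), Dom_count_lessons mt → Pre_count_lessons mt → Spec_count_lessons mt (count_lessons mt)

-- ===== LEMMAS AND PROOFS =====

-- indicator of mt[i][j] == 1
def pvInd (row : List Int) (j : Nat) : Int := if row.getD j 0 = 1 then 1 else 0

-- A as a map over columns of a per-column sum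
theorem pvA_eq (mt : List (List Int)) :
    count_lessons mt =
      (List.range (PySem.List.pyGetD mt 0 []).length).map
        (fun k => (mt.map (fun row => pvInd row k)).sum) := by
  unfold count_lessons
  rw [PySem.List.foldl_append_singleton_eq_map, List.nil_append]
  have hinner : ∀ j : Int,
      (PySem.List.pyRange 0 (PySem.List.len mt)).foldl
        (fun count i =>
          if PySem.List.pyGetD (PySem.List.pyGetD mt i []) j 0 = 1 then count + 1 else count) 0
      = (mt.map (fun row => if PySem.List.pyGetD row j 0 = 1 then (1 : Int) else 0)).sum := by
    intro j
    rw [PySem.List.foldl_pyRange_zero_pyGetD mt []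
      (fun count row => if PySem.List.pyGetD row j 0 = 1 then count + 1 else count) 0]
    have hf : (fun (c : Int) (row : List Int) =>
        if PySem.List.pyGetD row j 0 = 1 then c + 1 else c)
        = fun c row => c + (if PySem.List.pyGetD row j 0 = 1 then (1 : Int) else 0) := by
      funext c row; split_ifs <;> ring
    rw [hf, PySem.List.foldl_add, zero_add]
  simp only [hinner]
  rw [PySem.List.len, PySem.List.pyRange_zero_nat, List.map_map]
  refine List.map_congr_left (fun k _ => ?_)
  simp [pvInd, PySem.List.pyGetD_natCast]

-- reading a list back off by indices
theorem pvRangeGetD {α : Type} (l : List α) (d : α) :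
    (List.range l.length).map (fun i => l.getD i d) = l := by
  refine List.ext_getElem (by simp) ?_
  intro i h1 h2
  simp [List.getD_eq_getElem?_getD, h2]

-- the divide-and-conquer recursion computes, for each column k, the sum of the
-- row indicators over the half-open row range [lo, hi)
theorem pvColCountsB_eq (mt : List (List Int)) (m : Nat) :
    ∀ (n lo hi : Nat), hi - lo = n →
      pvColCountsB mt m lo hi =
        (List.range m).map
          (fun k => ((List.range' lo (hi - lo)).map (fun i => pvInd (mt.getD i []) k)).sum) := by
  intro n
  induction n using Nat.strong_induction_on with
  | _ n ih =>
    intro lo hi hn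
    rw [pvColCountsB]
    by_cases h0 : hi - lo = 0
    · rw [if_pos h0, h0]
      simp
    · rw [if_neg h0]
      by_cases h1 : hi - lo = 1
      · rw [if_pos h1, h1]
        refine List.map_congr_left (fun k _ => ?_)
        simp [pvInd, PySem.List.pyGetD_natCast, List.range'_one]
      · rw [if_neg h1]
        have hlo : lo + 2 ≤ hi := by omega
        have hmidl : (lo + hi) / 2 - lo < n := by omega
        have hmidr : hi - (lo + hi) / 2 < n := by omega
        rw [ih _ hmidl lo _ rfl, ih _ hmidr _ hi rfl]
        refine List.map_congr_left (fun k hk => ?_)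
        rw [List.mem_range] at hk
        simp only [List.getD_eq_getElem?_getD, List.getElem?_map, List.getElem?_range hk]
        have hsplit :
            List.range' lo (hi - lo)
              = List.range' lo ((lo + hi) / 2 - lo)
                ++ List.range' ((lo + hi) / 2) (hi - (lo + hi) / 2) := by
          rw [show hi - lo = ((lo + hi) / 2 - lo) + (hi - (lo + hi) / 2) from by omega,
            ← List.range'_append,
            show lo + 1 * ((lo + hi) / 2 - lo) = (lo + hi) / 2 from by omega]
        rw [hsplit, List.map_append, List.sum_append]
        simp

-- ===== VERDICT (by name: the statement is the Claim_ definition above) =====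
theorem count_lessons_spec : Claim_equal_count_lessons := by
  intro mt _ _
  unfold Spec_count_lessons count_lessons_alt
  rw [pvA_eq, pvColCountsB_eq mt _ mt.length 0 mt.length rfl]
  refine List.map_congr_left (fun k _ => ?_)
  rw [Nat.sub_zero, show List.range' 0 mt.length = List.range mt.length from
    (List.range_eq_range' ..).symm]
  have : (List.range mt.length).map (fun i => pvInd (mt.getD i []) k)
      = ((List.range mt.length).map (fun i => mt.getD i [])).map (fun row => pvInd row k) := by
    rw [List.map_map]; rfl
  rw [this, pvRangeGetD]
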